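-- pv_equiv track=rewrite | github.com/ramoro/Algoritmos-y-Programaci-n-I | TP1/TP1reversi.py | validacion_jugada
-- ===== SOURCE A (Python) =====
-- import string
--
-- N = 8
--
-- LISTALETRAS = list(string.ascii_uppercase)
--
-- POSICIONCOLUMNA = 0
--
-- def validacion_jugada(jugada):
-- 	'''Recibe la jugada ingresada por el usuario. En caso de ser correctas
--
-- 	sus coordenadas, devuelve True, en caso contrario, False.
--
-- 	'''
-- 	coordenadasfila = ''
-- 	coordenadacolumna = jugada[POSICIONCOLUMNA]
-- 	coordenadafila = 0
-- 	for coordenadas in jugada: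
-- 		if coordenadacolumna.isalpha():
-- 			coordenadacolumna = coordenadacolumna.upper()
-- 			if coordenadas.isdigit():
-- 				coordenadasfila += coordenadas
-- 				if len(coordenadasfila) == len(jugada) - 1:
-- 					coordenadafila = int(coordenadasfila)
-- 	return (coordenadafila >= 1 and coordenadafila <= N and
-- 	coordenadacolumna in LISTALETRAS[:N])
-- ===== SOURCE B (Python) =====
-- import string
--
-- N = 8
--
-- LISTALETRAS = list(string.ascii_uppercase)
--
-- def validacion_jugada(jugada):
--     '''Recibe la jugada ingresada por el usuario. En caso de ser correctas
--     sus coordenadas, devuelve True, en caso contrario, False.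
--     '''
--     col = jugada[0]
--     rest = jugada[1:]
--     fila = int(rest) if col.isalpha() and rest.isdigit() else 0
--     return 1 <= fila <= N and col.upper() in LISTALETRAS[:N]
-- ===== Notes on version B (the rewrite author's own statement) =====
-- stated objective: simpler
-- what changed: Replaces A's char-by-char accumulation loop (digit accumulator, length counter, mid-loop int() conversions) with direct slicing: column = first char, row = the rest of the string, validated with whole-string str.isdigit and a single int().
import Mathlib
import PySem

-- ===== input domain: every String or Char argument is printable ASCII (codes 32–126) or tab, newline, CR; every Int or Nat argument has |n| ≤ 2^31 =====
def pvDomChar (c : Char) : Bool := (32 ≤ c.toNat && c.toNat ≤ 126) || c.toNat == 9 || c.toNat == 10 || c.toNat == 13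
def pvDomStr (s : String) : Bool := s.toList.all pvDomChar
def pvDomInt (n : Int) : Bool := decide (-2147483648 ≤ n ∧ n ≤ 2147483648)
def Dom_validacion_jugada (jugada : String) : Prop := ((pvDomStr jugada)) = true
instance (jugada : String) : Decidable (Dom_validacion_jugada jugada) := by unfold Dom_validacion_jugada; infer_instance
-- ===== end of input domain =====

-- B replaces A's char-by-char accumulation loop (digit accumulator + length counter +
-- mid-loop int()) by direct slicing: column = first char, row = the rest of the string,
-- tested with whole-string isdigit and a single int(); objective: simpler.

-- ===== PORT A =====
-- LISTALETRAS = list(string.ascii_uppercase)  (used by both programs, as in the Python module)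
def pvLISTALETRAS : List Char :=
  ['A','B','C','D','E','F','G','H','I','J','K','L','M',
   'N','O','P','Q','R','S','T','U','V','W','X','Y','Z']

-- the body of A's `for coordenadas in jugada` loop; L = len(jugada)
def pvLoopBody (L : Nat) (st : List Char × Char × Int) (c : Char) : List Char × Char × Int :=
  let sfila := st.1
  let col := st.2.1
  let fila := st.2.2
  if PySem.Chars.isalpha col then
    let col := PySem.Chars.upperChar col
    if PySem.Chars.isdigit c then
      let sfila := sfila ++ [c]
      if sfila.length == L - 1 then
        (sfila, col, (PySem.Int.ofChars? sfila).getD 0)   -- int(coordenadasfila); its argument is a nonempty digit string here, so ofChars? = some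
      else (sfila, col, fila)
    else (sfila, col, fila)
  else (sfila, col, fila)

def validacion_jugada (jugada : String) : Bool :=
  let cs := jugada.toList
  let col0 := (PySem.List.pyGet? cs (0 : Int)).getD ' '   -- jugada[POSICIONCOLUMNA]; none (IndexError on "") is excluded by Pre_
  let st := cs.foldl (pvLoopBody cs.length) ([], col0, 0)
  decide (1 ≤ st.2.2 ∧ st.2.2 ≤ 8) && ((pvLISTALETRAS.take 8).contains st.2.1)

-- ===== PORT B =====
def validacion_jugada_alt (jugada : String) : Bool :=
  let cs := jugada.toList
  let col := (PySem.List.pyGet? cs (0 : Int)).getD ' '    -- jugada[0]; none (IndexError on "") is excluded by Pre_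
  let rest := PySem.List.slice cs (some 1) none            -- jugada[1:]
  let fila : Int :=
    if PySem.Chars.isalpha col && PySem.Chars.strIsdigit rest then
      (PySem.Int.ofChars? rest).getD 0                     -- int(rest); rest is a nonempty digit string here, so ofChars? = some
    else 0
  decide (1 ≤ fila ∧ fila ≤ 8) && ((pvLISTALETRAS.take 8).contains (PySem.Chars.upperChar col))

-- ===== PRECONDITION & SPEC =====
-- A raises IndexError on the empty string (jugada[0]); B raises there too.
def Pre_validacion_jugada (jugada : String) : Prop := jugada ≠ ""
instance (jugada : String) : Decidable (Pre_validacion_jugada jugada) := by unfold Pre_validacion_jugada; infer_instance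
def pvWitness_validacion_jugada : String := "A1"

def Spec_validacion_jugada (jugada : String) (out : Bool) : Prop := out = validacion_jugada_alt jugada
instance (jugada : String) (out : Bool) : Decidable (Spec_validacion_jugada jugada out) := by unfold Spec_validacion_jugada; infer_instance

-- ===== CLAIM (what is proved, stated in full; the proofs are below) =====
def Claim_equal_validacion_jugada : Prop := ∀ (jugada : String), Dom_validacion_jugada jugada → Pre_validacion_jugada jugada → Spec_validacion_jugada jugada (validacion_jugada jugada)

-- ===== LEMMAS AND PROOFS =====

theorem pv_toNat_ofNat (n : Nat) (h : n.isValidChar) : (Char.ofNat n).toNat = n := by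
  simp [Char.ofNat, h, Char.toNat, Char.ofNatAux]

theorem pv_islower_toNat (c : Char) : PySem.Chars.islower c = true ↔ 97 ≤ c.toNat ∧ c.toNat ≤ 122 := by
  simp [PySem.Chars.islower, Char.le_def, UInt32.le_iff_toNat_le]

theorem pv_isupper_toNat (c : Char) : PySem.Chars.isupper c = true ↔ 65 ≤ c.toNat ∧ c.toNat ≤ 90 := by
  simp [PySem.Chars.isupper, Char.le_def, UInt32.le_iff_toNat_le]

theorem pv_upper_of_not_lower (c : Char) (h : PySem.Chars.islower c = false) :
    PySem.Chars.upperChar c = c := by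
  simp [PySem.Chars.upperChar, h]

theorem pv_upper_toNat (c : Char) (hl : PySem.Chars.islower c = true) :
    (PySem.Chars.upperChar c).toNat = c.toNat - 32 := by
  have h1 := (pv_islower_toNat c).mp hl
  have hv : (c.toNat - 32).isValidChar := by left; omega
  simp only [PySem.Chars.upperChar, hl, if_pos]
  exact pv_toNat_ofNat _ hv

theorem pv_upper_idem (c : Char) (h : PySem.Chars.isalpha c = true) :
    PySem.Chars.isalpha (PySem.Chars.upperChar c) = true ∧
    PySem.Chars.upperChar (PySem.Chars.upperChar c) = PySem.Chars.upperChar c := by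
  by_cases hl : PySem.Chars.islower c = true
  · have h1 := (pv_islower_toNat c).mp hl
    have h2 := pv_upper_toNat c hl
    have hup : PySem.Chars.isupper (PySem.Chars.upperChar c) = true := by
      rw [pv_isupper_toNat]; omega
    have hnl : PySem.Chars.islower (PySem.Chars.upperChar c) = false := by
      rw [Bool.eq_false_iff]; intro hc; have := (pv_islower_toNat _).mp hc; omega
    exact ⟨by simp [PySem.Chars.isalpha, hup], pv_upper_of_not_lower _ hnl⟩
  · have hnl : PySem.Chars.islower c = false := by simpa using hl
    have he := pv_upper_of_not_lower c hnl
    rw [he]; exact ⟨h, he⟩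

theorem pv_alpha_not_digit (c : Char) (h : PySem.Chars.isalpha c = true) :
    PySem.Chars.isdigit c = false := by
  simp [PySem.Chars.isalpha, PySem.Chars.islower, PySem.Chars.isupper, PySem.Chars.isdigit,
    Char.le_def, UInt32.le_iff_toNat_le] at *
  omega

-- when the column is not a letter, A's loop body never changes the state
theorem pv_loop_inert (L : Nat) (l : List Char) (sfila : List Char) (col : Char) (fila : Int)
    (h : PySem.Chars.isalpha col = false) :
    l.foldl (pvLoopBody L) (sfila, col, fila) = (sfila, col, fila) := by
  induction l with
  | nil => rfl
  | cons c l ih => simpa [pvLoopBody, h] using ih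

-- full characterisation of A's loop once the column has become (and stays) an uppercase letter
theorem pv_loop_run (L : Nat) (u : Char) (hu : PySem.Chars.isalpha u = true)
    (hid : PySem.Chars.upperChar u = u)
    (l : List Char) (sfila : List Char) (fila : Int) :
    l.foldl (pvLoopBody L) (sfila, u, fila) =
      (sfila ++ l.filter PySem.Chars.isdigit, u,
       if sfila.length < L - 1 ∧ L - 1 ≤ sfila.length + l.countP PySem.Chars.isdigit then
         (PySem.Int.ofChars? ((sfila ++ l.filter PySem.Chars.isdigit).take (L-1))).getD 0
       else fila) := by
  induction l generalizing sfila fila with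
  | nil =>
    simp only [List.foldl_nil, List.filter_nil, List.countP_nil, List.append_nil, Nat.add_zero]
    rw [if_neg (by omega)]
  | cons c l ih =>
    by_cases hd : PySem.Chars.isdigit c = true
    · simp only [List.foldl_cons, pvLoopBody, hu, hid, hd, if_pos]
      by_cases h0 : ((sfila ++ [c]).length == L - 1) = true
      · have h0' : sfila.length + 1 = L - 1 := by simpa using h0
        rw [if_pos h0, ih]
        refine Prod.ext (by simp [hd]) (Prod.ext rfl ?_)
        simp only [List.filter_cons, List.countP_cons, hd, if_pos,
          List.length_append, List.length_singleton]
        conv_rhs => rw [List.append_cons]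
        rw [if_neg (by omega), if_pos ⟨by omega, by omega⟩,
          List.take_append_of_le_length (by simp; omega),
          List.take_of_length_le (by simp; omega)]
      · have h0' : sfila.length + 1 ≠ L - 1 := by simpa using h0
        rw [if_neg h0, ih]
        refine Prod.ext (by simp [hd]) (Prod.ext rfl ?_)
        simp only [List.filter_cons, List.countP_cons, hd, if_pos,
          List.length_append, List.length_singleton]
        conv_rhs => rw [List.append_cons]
        by_cases h2 : sfila.length + 1 < L - 1 ∧ L - 1 ≤ sfila.length + 1 + l.countP PySem.Chars.isdigit
        · rw [if_pos h2, if_pos (by omega)]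
        · rw [if_neg h2, if_neg (by omega)]
    · have hd' : PySem.Chars.isdigit c = false := by simpa using hd
      simp only [List.foldl_cons, pvLoopBody, hu, hid, hd', if_pos, Bool.false_eq_true, if_false]
      rw [ih]
      simp [hd']

theorem pv_toList_ne_nil (s : String) (h : s ≠ "") : s.toList ≠ [] := by
  intro hc
  exact h (by rwa [← String.toList_eq_nil_iff])

-- ===== VERDICT (by name: the statement is the Claim_ definition above) =====
theorem validacion_jugada_spec : Claim_equal_validacion_jugada := by
  intro jugada _ hpre
  unfold Spec_validacion_jugada validacion_jugada validacion_jugada_alt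
  have hnil := pv_toList_ne_nil jugada hpre
  obtain ⟨c0, rest, hcs⟩ := List.exists_cons_of_ne_nil hnil
  rw [hcs]
  simp only [show PySem.List.pyGet? (c0::rest) (0:Int) = some c0 from by simp [pysem],
    show PySem.List.slice (c0::rest) (some 1) none = rest from by simp [pysem],
    Option.getD_some]
  by_cases ha : PySem.Chars.isalpha c0 = true
  · rw [List.foldl_cons,
      show pvLoopBody (c0::rest).length ([], c0, 0) c0 = ([], PySem.Chars.upperChar c0, 0) from by
        simp [pvLoopBody, ha, pv_alpha_not_digit c0 ha]]
    obtain ⟨hu, hid⟩ := pv_upper_idem c0 ha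
    rw [pv_loop_run _ _ hu hid]
    simp only [List.length_cons, Nat.add_sub_cancel, List.nil_append, List.length_nil, Nat.zero_add, ha, Bool.true_and]
    by_cases hrd : PySem.Chars.strIsdigit rest = true
    · have hall : ∀ a ∈ rest, PySem.Chars.isdigit a = true := by
        have := hrd
        simp [PySem.Chars.strIsdigit, List.all_eq_true] at this
        exact fun a haa => this.2 a haa
      have hne : rest ≠ [] := by
        have := hrd
        simp [PySem.Chars.strIsdigit] at this
        exact this.1
      have hcnt : rest.countP PySem.Chars.isdigit = rest.length := List.countP_eq_length.mpr hall
      have hfil : rest.filter PySem.Chars.isdigit = rest := List.filter_eq_self.mpr hall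
      rw [hcnt, hfil, if_pos ⟨List.length_pos_of_ne_nil hne, le_rfl⟩, List.take_length]
      simp [hrd]
    · have hcond : ¬ (0 < rest.length ∧ rest.length ≤ rest.countP PySem.Chars.isdigit) := by
        rintro ⟨h1, h2⟩
        have hle := List.countP_le_length (p := PySem.Chars.isdigit) (l := rest)
        have hcnt : rest.countP PySem.Chars.isdigit = rest.length := by omega
        have hall := List.countP_eq_length.mp hcnt
        have : PySem.Chars.strIsdigit rest = true := by
          simp [PySem.Chars.strIsdigit, List.all_eq_true, List.isEmpty_eq_false_iff]
          exact ⟨by rintro rfl; simp at h1, hall⟩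
        exact hrd this
      rw [if_neg hcond]
      simp [hrd]
  · have ha' : PySem.Chars.isalpha c0 = false := by simpa using ha
    rw [pv_loop_inert _ _ _ _ _ ha']
    simp [ha']
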